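-- pv_equiv track=rewrite | github.com/snsinfu/bit4 | test270-rotation.py | stack_columns
-- ===== SOURCE A (Python) =====
-- def stack_columns(cols, padding=' '):
--     line_cols = [list_lines(col) for col in cols]
--     widths = [max(len(line) for line in col) for col in line_cols]
--     height = max(len(col) for col in line_cols)
--
--     just_cols = []
--     for col, width in zip(line_cols, widths):
--         lines = [line.ljust(width) for line in col]
--         lines += [''] * (height - len(lines))
--         just_cols.append(lines)
--
--     output = ''
--     for cells in zip(*just_cols):
--         output += padding.join(cells) + '\n'
--
--     return output
--
-- def list_lines(text):
--     lines = text.split('\n')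
--     if lines and lines[-1] == '':
--         lines = lines[:-1]
--     return lines
-- ===== SOURCE B (Python) =====
-- def stack_columns(cols, padding=' '):
--     line_cols = [list_lines(col) for col in cols]
--     widths = [max(len(line) for line in col) for col in line_cols]
--     height = max(len(col) for col in line_cols)
--
--     output = ''
--     for i in range(height):
--         cells = [col[i].ljust(width) if i < len(col) else ''
--                  for col, width in zip(line_cols, widths)]
--         output += padding.join(cells) + '\n'
--     return output
--
-- def list_lines(text):
--     lines = text.split('\n')
--     if lines and lines[-1] == '':
--         lines = lines[:-1]
--     return lines
-- ===== Notes on version B (the rewrite author's own statement) =====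
-- stated objective: simpler
-- what changed: B drops the padded just_cols grid and the zip(*...) transpose: it iterates row indices directly and gathers each output row across the columns with an in-range/ljust-or-empty cell expression.
import Mathlib
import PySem

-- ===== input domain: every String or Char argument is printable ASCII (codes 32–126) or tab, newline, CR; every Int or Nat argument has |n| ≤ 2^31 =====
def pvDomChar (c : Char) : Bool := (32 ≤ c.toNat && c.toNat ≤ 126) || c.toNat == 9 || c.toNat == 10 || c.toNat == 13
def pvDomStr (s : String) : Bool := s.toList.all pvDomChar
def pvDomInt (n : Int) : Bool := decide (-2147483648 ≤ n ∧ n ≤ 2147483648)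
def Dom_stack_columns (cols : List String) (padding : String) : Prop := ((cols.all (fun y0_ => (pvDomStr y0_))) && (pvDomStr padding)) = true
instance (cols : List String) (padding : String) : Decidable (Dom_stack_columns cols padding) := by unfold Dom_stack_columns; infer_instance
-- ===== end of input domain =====

-- B replaces A's padded just_cols grid + zip(*...) transpose by a direct per-row gather across the
-- columns (objective: simpler, same asymptotic cost).

-- ===== PORT A =====
-- helper shared by both ports: Source B contains the identical list_lines
def list_lines (text : String) : List String :=
  let lines := (PySem.Str.split? text "\n").getD []  -- sep ≠ "" so split? is always some
  if lines ≠ [] ∧ PySem.List.pyGet? lines (-1) = some "" then PySem.List.slice lines none (some (-1)) else lines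

-- str.ljust(w): pad on the right with spaces to width w (hand port; exact for any width)
def pyLjust (s : String) (w : Int) : String :=
  String.ofList (s.toList ++ List.replicate (w - (s.toList.length : Int)).toNat ' ')

-- termination helper for pyZipAll (cited by decreasing_by)
theorem pvSumTailLt (ls : List (List String)) (hne : ls ≠ []) (hall : ∀ l ∈ ls, l ≠ []) :
    ((ls.map List.tail).map List.length).sum < (ls.map List.length).sum := by
  induction ls with
  | nil => cases hne rfl
  | cons h t ih =>
    have hh : h ≠ [] := hall h (by simp)
    have h1 : h.tail.length < h.length := by
      cases h with
      | nil => cases hh rfl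
      | cons a b => simp
    by_cases ht : t = []
    · subst ht; simpa using h1
    · have := ih ht (fun l hl => hall l (by simp [hl]))
      simp only [List.map_cons, List.sum_cons]
      omega

-- hand port of Python's zip(*lists): rows of heads until some list is exhausted (exact)
def pyZipAll (ls : List (List String)) : List (List String) :=
  if h : ls.isEmpty || ls.any List.isEmpty then []
  else (ls.map (fun l => l.headD "")) :: pyZipAll (ls.map List.tail)
termination_by (ls.map List.length).sum
decreasing_by
  have h' : ¬ls = [] ∧ [] ∉ ls := by simpa using h
  have hm : List.map (fun x : {x // x ∈ ls} => (↑x : List String).tail) ls.attach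
      = List.map List.tail ls := by
    rw [List.map_attach_eq_pmap, List.pmap_eq_map]
  rw [hm]
  exact pvSumTailLt ls h'.1 (fun l hl hle => h'.2 (hle ▸ hl))

def stack_columns (cols : List String) (padding : String) : String :=
  let line_cols := cols.map list_lines
  let widths := line_cols.map (fun col => (PySem.List.max? (col.map PySem.Str.len) (fun x => x)).getD 0)
  let height := (PySem.List.max? (line_cols.map PySem.List.len) (fun x => x)).getD 0
  let just_cols := (line_cols.zip widths).foldl (fun acc cw =>
      let lines := cw.1.map (fun line => pyLjust line cw.2)
      let lines := lines ++ List.replicate (height - (lines.length : Int)).toNat ""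
      acc ++ [lines]) []
  (pyZipAll just_cols).foldl (fun out cells => out ++ PySem.Str.join padding cells ++ "\n") ""

-- ===== PORT B =====
def stack_columns_alt (cols : List String) (padding : String) : String :=
  let line_cols := cols.map list_lines
  let widths := line_cols.map (fun col => (PySem.List.max? (col.map PySem.Str.len) (fun x => x)).getD 0)
  let height := (PySem.List.max? (line_cols.map PySem.List.len) (fun x => x)).getD 0
  (PySem.List.pyRange 0 height 1).foldl (fun out i =>
      let cells := (line_cols.zip widths).map (fun cw =>
        if i < PySem.List.len cw.1 then pyLjust (PySem.List.pyGetD cw.1 i "") cw.2 else "")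
      out ++ PySem.Str.join padding cells ++ "\n") ""

-- ===== PRECONDITION & SPEC =====
-- Python A raises ValueError (max() of an empty sequence) when cols is empty or some column is the
-- empty string (whose line list is empty); Pre_ excludes exactly those inputs.
def Pre_stack_columns (cols : List String) (padding : String) : Prop :=
  cols ≠ [] ∧ "" ∉ cols
instance (cols : List String) (padding : String) : Decidable (Pre_stack_columns cols padding) := by
  unfold Pre_stack_columns; infer_instance
def pvWitness_stack_columns : List String × String := (["a\nbb", "c"], " ")

def Spec_stack_columns (cols : List String) (padding : String) (out : String) : Prop := out = stack_columns_alt cols padding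
instance (cols : List String) (padding : String) (out : String) : Decidable (Spec_stack_columns cols padding out) := by unfold Spec_stack_columns; infer_instance

-- ===== CLAIM (what is proved, stated in full; the proofs are below) =====
def Claim_equal_stack_columns : Prop := ∀ (cols : List String) (padding : String), Dom_stack_columns cols padding → Pre_stack_columns cols padding → Spec_stack_columns cols padding (stack_columns cols padding)

-- ===== LEMMAS AND PROOFS =====

-- zip(*lists) on a nonempty list of equal-length lists is the index-by-index transpose
theorem pvZipUniform (n : Nat) : ∀ ls : List (List String), ls ≠ [] → (∀ l ∈ ls, l.length = n) →
    pyZipAll ls = (List.range n).map (fun i => ls.map (fun l => l.getD i "")) := by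
  induction n with
  | zero =>
    intro ls hne hlen
    cases ls with
    | nil => cases hne rfl
    | cons h t =>
      have hh : h = [] := List.eq_nil_of_length_eq_zero (hlen h (by simp))
      rw [pyZipAll]
      simp [hh]
  | succ n ih =>
    intro ls hne hlen
    have hne' : ∀ l ∈ ls, l ≠ [] := by
      intro l hl hl0
      have := hlen l hl
      simp [hl0] at this
    have hcond : (ls.isEmpty || ls.any List.isEmpty) = false := by
      simp only [Bool.or_eq_false_iff, List.isEmpty_eq_false_iff, List.any_eq_false]
      exact ⟨hne, fun l hl => by simpa [List.isEmpty_iff] using hne' l hl⟩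
    rw [pyZipAll, dif_neg (by simp [hcond])]
    have h1 : ls.map List.tail ≠ [] := by simpa using hne
    have h2 : ∀ l ∈ ls.map List.tail, l.length = n := by
      intro l hl
      obtain ⟨l', hl', rfl⟩ := List.mem_map.mp hl
      have h3 := hlen l' hl'
      simp [h3]
    rw [ih (ls.map List.tail) h1 h2, List.range_succ_eq_map, List.map_cons, List.map_map]
    refine congrArg₂ List.cons ?_ ?_
    · refine List.map_congr_left (fun l hl => ?_)
      cases l with
      | nil => cases hne' [] hl rfl
      | cons a b => simp
    · refine List.map_congr_left (fun i _ => ?_)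
      rw [List.map_map]
      refine List.map_congr_left (fun l hl => ?_)
      cases l with
      | nil => cases hne' [] hl rfl
      | cons a b => simp

-- the core equality: padded-grid + transpose = per-row gather, for any nonempty list of line columns
theorem pvMain (LC : List (List String)) (padding : String) (hne : LC ≠ []) :
    List.foldl (fun out cells => out ++ PySem.Str.join padding cells ++ "\n") ""
      (pyZipAll
        (List.foldl
          (fun acc cw =>
            acc ++
              [List.map (fun line => pyLjust line cw.2) cw.1 ++
                  List.replicate
                    (((PySem.List.max? (List.map PySem.List.len LC) fun x => x).getD 0 -
                        ((List.map (fun line => pyLjust line cw.2) cw.1).length : Int)).toNat)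
                    ""])
          []
          (LC.zip
            (List.map (fun col => (PySem.List.max? (List.map PySem.Str.len col) fun x => x).getD 0) LC)))) =
    List.foldl
      (fun out i =>
        out ++
            PySem.Str.join padding
              (List.map (fun cw => if i < PySem.List.len cw.1 then pyLjust (PySem.List.pyGetD cw.1 i "") cw.2 else "")
                (LC.zip
                  (List.map (fun col => (PySem.List.max? (List.map PySem.Str.len col) fun x => x).getD 0) LC))) ++
          "\n")
      ""
      (PySem.List.pyRange 0 ((PySem.List.max? (List.map PySem.List.len LC) fun x => x).getD 0)) := by
  obtain ⟨m, hm⟩ : ∃ m, PySem.List.max? (List.map PySem.List.len LC) (fun x => x) = some m := by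
    cases hx : PySem.List.max? (List.map PySem.List.len LC) (fun x => x) with
    | none => exact absurd ((PySem.List.max?_eq_none_iff _ _).mp hx) (by simp [hne])
    | some m => exact ⟨m, rfl⟩
  have hmax : ∀ l ∈ LC, (l.length : Int) ≤ m := by
    intro l hl
    have := PySem.List.max?_isMax hm (PySem.List.len l) (List.mem_map_of_mem hl)
    simpa using this
  have hm0 : 0 ≤ m := by
    obtain ⟨l, hl, rfl⟩ := List.mem_map.mp (PySem.List.max?_mem hm)
    simp
  rw [hm]
  simp only [Option.getD_some]
  rw [PySem.List.foldl_append_singleton_eq_map, List.nil_append]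
  set W := List.map (fun col => (PySem.List.max? (List.map PySem.Str.len col) fun x => x).getD 0) LC with hW
  set P := LC.zip W with hP
  have hPmem : ∀ cw ∈ P, cw.1 ∈ LC := fun cw hcw => (List.of_mem_zip hcw).1
  have hPne : P ≠ [] := by
    have : P.length = LC.length := by
      rw [hP, hW, List.length_zip, List.length_map, min_self]
    intro h0
    exact hne (List.eq_nil_of_length_eq_zero (by rw [← this, h0]; rfl))
  have hlens : ∀ l ∈ P.map (fun cw =>
      List.map (fun line => pyLjust line cw.2) cw.1 ++
        List.replicate ((m - ((List.map (fun line => pyLjust line cw.2) cw.1).length : Int)).toNat) ""),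
      l.length = m.toNat := by
    intro l hl
    obtain ⟨cw, hcw, rfl⟩ := List.mem_map.mp hl
    have h1 := hmax cw.1 (hPmem cw hcw)
    simp only [List.length_append, List.length_map, List.length_replicate]
    omega
  rw [pvZipUniform m.toNat _ (by simpa using hPne) hlens, List.foldl_map]
  have hmtn : m = ((m.toNat : Nat) : Int) := (Int.toNat_of_nonneg hm0).symm
  have hrange := PySem.List.pyRange_zero_natCast m.toNat
  rw [← hmtn] at hrange
  rw [hrange, List.foldl_map]
  apply PySem.List.foldl_congr_mem
  intro acc i hi
  have hi' : i < m.toNat := List.mem_range.mp hi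
  have hcells : (P.map (fun cw =>
      List.map (fun line => pyLjust line cw.2) cw.1 ++
        List.replicate ((m - ((List.map (fun line => pyLjust line cw.2) cw.1).length : Int)).toNat) "")).map
        (fun l => l.getD i "") =
      P.map (fun cw => if (i : Int) < PySem.List.len cw.1 then pyLjust (PySem.List.pyGetD cw.1 (i : Int) "") cw.2 else "") := by
    rw [List.map_map]
    refine List.map_congr_left (fun cw hcw => ?_)
    have h1 := hmax cw.1 (hPmem cw hcw)
    by_cases hil : i < cw.1.length
    · rw [Function.comp_apply, if_pos (by simp; exact_mod_cast hil)]
      rw [List.getD_eq_getElem _ _ (by simp only [List.length_append, List.length_map, List.length_replicate]; omega)]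
      rw [List.getElem_append_left (by simpa using hil), List.getElem_map]
      rw [PySem.List.pyGetD_natCast, List.getD_eq_getElem _ _ hil]
    · rw [Function.comp_apply, if_neg (by simp; omega)]
      rw [List.getD_eq_getElem?_getD, List.getElem?_append_right (by simpa using Nat.le_of_not_lt hil)]
      simp only [List.length_map, List.getElem?_replicate]
      split <;> rfl
  rw [hcells]

theorem stack_columns_spec : Claim_equal_stack_columns := by
  intro cols padding _ hpre
  obtain ⟨hne, hnin⟩ := hpre
  unfold Spec_stack_columns stack_columns stack_columns_alt
  simp only []
  exact pvMain (cols.map list_lines) padding (by simpa using hne)
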